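-- pv_equiv track=rewrite | github.com/StellarL/CDKG | MathUtil.py | getlen
-- ===== SOURCE A (Python) =====
-- def getlen(SymbolArr):
--     loc = {}
--     maxl=0
--     for symbol in SymbolArr:
--         if symbol[4] not in loc.keys():loc[symbol[4]]=1
--         else: loc[symbol[4]]+=1
--         maxl=maxl if maxl>loc[symbol[4]] else loc[symbol[4]]
--     return maxl
-- ===== SOURCE B (Python) =====
-- def getlen(SymbolArr):
--     best = 0
--     for s in SymbolArr:
--         c = 0
--         for t in SymbolArr:
--             if t[4] == s[4]:
--                 c += 1
--         if c > best:
--             best = c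
--     return best
-- ===== Notes on version B (the rewrite author's own statement) =====
-- stated objective: alternative
-- what changed: B drops the frequency dictionary and the running max entirely: for each element it recounts the occurrences of its key symbol[4] with a nested full scan of the array and keeps the largest such count, trading A's O(n) hash counting for a dictionary-free quadratic brute force.
import Mathlib
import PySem

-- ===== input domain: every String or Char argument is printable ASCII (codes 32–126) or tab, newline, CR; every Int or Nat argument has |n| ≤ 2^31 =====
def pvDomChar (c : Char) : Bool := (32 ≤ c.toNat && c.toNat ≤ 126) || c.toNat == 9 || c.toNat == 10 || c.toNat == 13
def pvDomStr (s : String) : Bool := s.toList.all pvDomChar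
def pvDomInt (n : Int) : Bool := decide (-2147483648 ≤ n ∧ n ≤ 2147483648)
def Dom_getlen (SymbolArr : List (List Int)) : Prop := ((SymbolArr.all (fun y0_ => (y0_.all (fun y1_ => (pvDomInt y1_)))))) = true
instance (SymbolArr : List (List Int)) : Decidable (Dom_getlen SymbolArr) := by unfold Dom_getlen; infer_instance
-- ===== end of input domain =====

-- B abandons A's frequency dictionary and running max: it recounts each element's key symbol[4]
-- with a nested full scan and keeps the largest count (dictionary-free quadratic brute force).


-- ===== PORT A =====
-- one iteration of A's loop over the state (loc, maxl)
def getlenStepA (p : PySem.Dict Int Int × Int) (symbol : List Int) : PySem.Dict Int Int × Int :=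
  let k := PySem.List.pyGetD symbol 4 0        -- symbol[4]; exact under Pre_ (len ≥ 5)
  let loc := if k ∈ p.1.keys then p.1.modify k 0 (· + 1) else p.1.insert k 1
  (loc, if p.2 > loc.getD k 0 then p.2 else loc.getD k 0)

def getlen (SymbolArr : List (List Int)) : Int :=
  (SymbolArr.foldl getlenStepA (PySem.Dict.empty, 0)).2

-- ===== PORT B =====
def getlen_alt (SymbolArr : List (List Int)) : Int :=
  SymbolArr.foldl
    (fun best s =>
      let c := SymbolArr.foldl
        (fun c t => if PySem.List.pyGetD t 4 0 == PySem.List.pyGetD s 4 0 then c + 1 else c) 0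
      if c > best then c else best)
    0

-- ===== PRECONDITION & SPEC =====
-- Pre_ excludes inputs where some row has fewer than 5 entries: there symbol[4] raises IndexError in A (and in B).
def Pre_getlen (SymbolArr : List (List Int)) : Prop := ∀ s ∈ SymbolArr, 5 ≤ s.length
instance (SymbolArr : List (List Int)) : Decidable (Pre_getlen SymbolArr) := by unfold Pre_getlen; infer_instance
def pvWitness_getlen : List (List Int) := [[0,0,0,0,7],[1,1,1,1,7],[0,0,0,0,2]]

def Spec_getlen (SymbolArr : List (List Int)) (out : Int) : Prop := out = getlen_alt SymbolArr
instance (SymbolArr : List (List Int)) (out : Int) : Decidable (Spec_getlen SymbolArr out) := by unfold Spec_getlen; infer_instance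

-- ===== CLAIM (what is proved, stated in full; the proofs are below) =====
def Claim_equal_getlen : Prop := ∀ (SymbolArr : List (List Int)), Dom_getlen SymbolArr → Pre_getlen SymbolArr → Spec_getlen SymbolArr (getlen SymbolArr)

-- ===== LEMMAS AND PROOFS =====

-- the key A and B both extract from a row
def keyOf (s : List Int) : Int := PySem.List.pyGetD s 4 0

-- A's inline running-max step is Int.max
lemma step_eq_max : (fun (m v : Int) => if v > m then v else m) = (fun (m v : Int) => max m v) := by
  funext m v; split <;> omega

-- A's two-branch dict update equals the single-form counting update
lemma stepA_dict (d : PySem.Dict Int Int) (k : Int) :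
    (if k ∈ d.keys then d.modify k 0 (· + 1) else d.insert k 1)
      = d.insert k (d.getD k 0 + 1) := by
  by_cases h : k ∈ d.keys
  · simp only [h, if_true]; rfl
  · have hc : d.contains k = false := by
      rw [Bool.eq_false_iff]
      intro hcc
      exact h ((PySem.Dict.contains_iff_mem_keys d k).mp hcc)
    rw [if_neg h, PySem.Dict.getD_of_not_contains d 0 hc]
    norm_num

-- bumping one existing key's value by 1 in an assoc list with distinct keys:
-- the running max of the values becomes the max of the old running max and the bumped value
lemma vals_bump (l : List (Int × Int)) (k w : Int) :
    ∀ m : Int, (l.map Prod.fst).Nodup → (k, w) ∈ l →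
    ((l.map (fun p => if p.1 = k then (k, w + 1) else p)).map Prod.snd).foldl max m
      = max ((l.map Prod.snd).foldl max m) (w + 1) := by
  induction l with
  | nil => intro m _ hmem; cases hmem
  | cons p t ih =>
    intro m hnd hmem
    have hndt : (t.map Prod.fst).Nodup := (List.nodup_cons.mp (by simpa using hnd)).2
    have hpt : p.1 ∉ t.map Prod.fst := (List.nodup_cons.mp (by simpa using hnd)).1
    rcases List.mem_cons.mp hmem with hp | hmt
    · subst hp
      have htid : t.map (fun p => if p.1 = k then (k, w + 1) else p) = t.map id := by
        apply List.map_congr_left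
        intro q hq
        have hq1 : q.1 ≠ k := by
          intro hqk
          have hqm : q.1 ∈ t.map Prod.fst := List.mem_map_of_mem (f := Prod.fst) hq
          rw [hqk] at hqm
          exact hpt hqm
        simp [hq1]
      simp only [List.map_cons, htid, List.map_id, List.foldl_cons]
      show (t.map Prod.snd).foldl max (max m (w + 1))
          = max ((t.map Prod.snd).foldl max (max m w)) (w + 1)
      rw [max_comm m (w + 1), List.foldl_assoc, max_comm m w, List.foldl_assoc]
      omega
    · have hpk : p.1 ≠ k := by
        intro hpk
        apply hpt
        rw [hpk]
        exact List.mem_map_of_mem hmt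
      simp only [List.map_cons, if_neg hpk, List.foldl_cons]
      exact ih (max m p.2) hndt hmt

-- running max over the values of the updated dict
lemma runmax_insert (d : PySem.Dict Int Int) (k : Int) (h : d.keys.Nodup) :
    ((d.insert k (d.getD k 0 + 1)).values).foldl max 0
      = max (d.values.foldl max 0) (d.getD k 0 + 1) := by
  by_cases hc : d.contains k = true
  · obtain ⟨w, hw⟩ : ∃ w, d.get? k = some w := by
      rw [PySem.Dict.contains_eq_isSome_get?] at hc
      exact Option.isSome_iff_exists.mp hc
    have hgd : d.getD k 0 = w := PySem.Dict.getD_of_get?_eq_some d 0 hw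
    have hmem : (k, w) ∈ d.items := PySem.Dict.mem_items_of_get?_eq_some d hw
    have hitems : (d.insert k (w + 1)).items
        = d.items.map (fun p => if p.1 = k then (k, w + 1) else p) := by
      rw [PySem.Dict.items_insert_of_contains d (w + 1) hc]
      simp only [beq_iff_eq]
    rw [hgd]
    simp only [PySem.Dict.values, hitems]
    exact vals_bump d.items k w 0 h hmem
  · have hitems := PySem.Dict.items_insert_of_not_contains d (d.getD k 0 + 1)
      (by simpa using hc)
    simp only [PySem.Dict.values, hitems, List.map_append, List.foldl_append]
    simp

-- invariant for A: its running max equals the running max of the values of the counting dict built so far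
lemma main_inv (l : List (List Int)) :
    ∀ (d : PySem.Dict Int Int) (m : Int), d.keys.Nodup →
    m = d.values.foldl (fun m v => if v > m then v else m) 0 →
    (l.foldl getlenStepA (d, m)).2
      = (l.foldl (fun d symbol => d.insert (PySem.List.pyGetD symbol 4 0)
          (d.getD (PySem.List.pyGetD symbol 4 0) 0 + 1)) d).values.foldl
            (fun m v => if v > m then v else m) 0 := by
  induction l with
  | nil => intro d m _ hm; exact hm
  | cons s t ih =>
    intro d m hnd hm
    simp only [List.foldl_cons]
    have hstep : getlenStepA (d, m) s
        = (d.insert (PySem.List.pyGetD s 4 0) (d.getD (PySem.List.pyGetD s 4 0) 0 + 1),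
           if m > d.getD (PySem.List.pyGetD s 4 0) 0 + 1 then m
           else d.getD (PySem.List.pyGetD s 4 0) 0 + 1) := by
      simp only [getlenStepA]
      rw [stepA_dict]
      simp [PySem.Dict.getD_insert_self]
    rw [hstep]
    apply ih
    · exact PySem.Dict.nodup_keys_insert d _ _ hnd
    · rw [step_eq_max] at hm ⊢
      rw [runmax_insert d _ hnd, ← hm]
      split_ifs <;> omega

-- A's counting loop IS Counter(keys)
lemma insertloop_eq_counter (l : List (List Int)) :
    l.foldl (fun d symbol => d.insert (PySem.List.pyGetD symbol 4 0)
        (d.getD (PySem.List.pyGetD symbol 4 0) 0 + 1)) PySem.Dict.empty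
      = PySem.Dict.counter (l.map keyOf) := by
  rw [← PySem.Dict.foldl_insert_getD_add_one_eq_counter, List.foldl_map]
  rfl

-- a projected running max depends only on the members of the list it scans
lemma foldl_max_proj_congr (f : Int → Int) (X Y : List Int) (a : Int)
    (h : ∀ x, x ∈ X ↔ x ∈ Y) :
    (X.map f).foldl max a = (Y.map f).foldl max a := by
  have bound : ∀ (Z W : List Int), (∀ x, x ∈ Z ↔ x ∈ W) →
      (Z.map f).foldl max a ≤ (W.map f).foldl max a := by
    intro Z W hZW
    rcases PySem.List.foldl_max_mem (Z.map f) a with heq | hmem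
    · rw [heq]; exact (PySem.List.le_foldl_max (W.map f) a).1
    · rcases List.mem_map.mp hmem with ⟨x, hx, hfx⟩
      rw [← hfx]
      exact (PySem.List.le_foldl_max (W.map f) a).2 _ (List.mem_map_of_mem ((hZW x).mp hx))
  exact le_antisymm (bound X Y h) (bound Y X (fun x => (h x).symm))

-- B's inner scan counts the key, so B is a running max of key-counts over the array
lemma alt_eq_keycount_max (l : List (List Int)) :
    getlen_alt l
      = ((l.map keyOf).map (fun k => ((l.map keyOf).count k : Int))).foldl max 0 := by
  unfold getlen_alt
  rw [List.map_map, List.foldl_map]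
  apply PySem.List.foldl_congr_mem
  intro b s _
  have hcnt : l.foldl
      (fun c t => if PySem.List.pyGetD t 4 0 == PySem.List.pyGetD s 4 0 then c + 1 else c) 0
        = ((l.map keyOf).count (keyOf s) : Int) := by
    rw [List.count_eq_countP, List.countP_map]
    rw [PySem.List.foldl_if_add_one (p := fun t => PySem.List.pyGetD t 4 0 == PySem.List.pyGetD s 4 0)]
    simp only [zero_add, Function.comp_def, keyOf]
  show (if (l.foldl (fun c t => if PySem.List.pyGetD t 4 0 == PySem.List.pyGetD s 4 0 then c + 1 else c) 0) > b
        then l.foldl (fun c t => if PySem.List.pyGetD t 4 0 == PySem.List.pyGetD s 4 0 then c + 1 else c) 0 else b)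
      = max b (((fun k => ((l.map keyOf).count k : Int)) ∘ keyOf) s)
  rw [hcnt]
  simp only [Function.comp_def]
  split_ifs <;> omega

-- ===== VERDICT (by name: the statement is the Claim_ definition above) =====
theorem getlen_spec : Claim_equal_getlen := by
  intro l _ _
  unfold Spec_getlen
  unfold getlen
  rw [main_inv l PySem.Dict.empty 0 (by simp [pysem]) rfl, insertloop_eq_counter,
      alt_eq_keycount_max, step_eq_max]
  rw [show (PySem.Dict.counter (l.map keyOf)).values
        = (PySem.Set.ofList (l.map keyOf)).map (fun k => ((l.map keyOf).count k : Int)) by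
      simp only [PySem.Dict.values, PySem.Dict.items_counter, List.map_map]; rfl]
  exact foldl_max_proj_congr _ _ _ 0 (fun x => by simp [PySem.Set.mem_ofList])
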